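-- pv_equiv track=rewrite | github.com/ICEJM1020/LightYourEyes | data_loader.py | split_raw_data
-- ===== SOURCE A (Python) =====
-- def get_continuous_values(numbers):
--     if not numbers:
--         return []
--
--     ranges = []
--     start = numbers[0]
--     end = numbers[0]
--
--     for i in range(1, len(numbers)):
--         if numbers[i] == end + 1:
--             # 连续，扩展当前范围
--             end = numbers[i]
--         else:
--             # 不连续，保存当前范围并开始新的
--             ranges.append((start, end))
--             start = numbers[i]
--             end = numbers[i]
--
--     ranges.append((start, end))
--     return ranges
--
-- def split_raw_data(raw_data) -> list:
--      # 找到所有videoName的位置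
--     video_indices = []
--     for i, item in enumerate(raw_data):
--         if item['videoName'] != '':
--             video_indices.append(i)
--
--     if not video_indices:
--         # 如果没有视频，整个列表都是RGB变化
--         return {'light_changes': raw_data}
--
--     _v_start_end_pairs = get_continuous_values(video_indices)
--
--     v_segs = {}
--     last_end = 0
--     for _, pair in enumerate(_v_start_end_pairs):
--         _temp = raw_data[last_end : pair[1]+1]
--         v_segs[raw_data[pair[1]]["videoName"]] = _temp
--         last_end = pair[1]+1
--     v_segs.update({'light_changes': raw_data[last_end:]})
--     return v_segs
-- ===== SOURCE B (Python) =====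
-- def split_raw_data(raw_data) -> list:
--     # Single pass: pair each videoName with its successor's name; an item whose
--     # name is non-empty while the next name is empty (or absent) ends a video run.
--     names = [item['videoName'] for item in raw_data]
--     v_segs = {}
--     last_end = 0
--     for i, (name, nxt) in enumerate(zip(names, names[1:] + [''])):
--         if name != '' and nxt == '':
--             v_segs[name] = raw_data[last_end:i + 1]
--             last_end = i + 1
--     v_segs['light_changes'] = raw_data[last_end:]
--     return v_segs
-- ===== Notes on version B (the rewrite author's own statement) =====
-- stated objective: simpler
-- what changed: B fuses A's three passes (collect video indices, group them with get_continuous_values, slice per range) into a single enumerate pass that pairs each videoName with its successor's name and cuts a segment wherever a non-empty name is followed by an empty one (or the end), dropping the index list and the helper entirely.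
import Mathlib
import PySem

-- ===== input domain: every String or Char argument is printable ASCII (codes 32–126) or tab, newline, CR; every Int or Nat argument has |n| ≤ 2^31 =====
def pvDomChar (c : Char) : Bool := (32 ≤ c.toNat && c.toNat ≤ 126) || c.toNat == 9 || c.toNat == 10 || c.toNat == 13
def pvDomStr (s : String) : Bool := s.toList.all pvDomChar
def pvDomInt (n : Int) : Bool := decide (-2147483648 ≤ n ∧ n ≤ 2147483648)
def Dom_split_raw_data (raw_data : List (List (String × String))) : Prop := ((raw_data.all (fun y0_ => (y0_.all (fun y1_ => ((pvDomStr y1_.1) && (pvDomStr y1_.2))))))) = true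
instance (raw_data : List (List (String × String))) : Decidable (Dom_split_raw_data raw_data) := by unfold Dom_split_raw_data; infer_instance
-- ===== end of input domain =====

-- B replaces A's three passes (index list, get_continuous_values, slicing loop) by one pass that
-- pairs each videoName with its successor's name and cuts a segment where a run of names ends;
-- in A's no-video branch A returns the raw_data object itself while B returns an equal copy
-- (return-value equivalence only).

-- item['videoName'] (first-match lookup in the item dict; Pre_ guarantees the key exists)
def vn (item : List (String × String)) : String :=
  ((PySem.Dict.mk item).get? "videoName").getD ""

-- ===== PORT A =====
def get_continuous_values (numbers : List Int) : List (Int × Int) :=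
  match numbers with
  | [] => []
  | x :: rest =>
      -- state: (ranges, start, end); loop 'for i in range(1, len(numbers))' reads numbers[i] = the tail
      let st := rest.foldl
        (fun (st : List (Int × Int) × Int × Int) nu =>
          if nu = st.2.2 + 1 then (st.1, st.2.1, nu)
          else (st.1 ++ [(st.2.1, st.2.2)], nu, nu))
        ([], x, x)
      st.1 ++ [(st.2.1, st.2.2)]

def split_raw_data (raw_data : List (List (String × String))) : List (String × List (List (String × String))) :=
  let video_indices := (PySem.List.enumerate raw_data 0).foldl
    (fun acc p => if vn p.2 != "" then acc ++ [p.1] else acc) []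
  if video_indices = [] then [("light_changes", raw_data)]
  else
    let pairs := get_continuous_values video_indices
    let st := pairs.foldl
      (fun (st : PySem.Dict String (List (List (String × String))) × Int) pair =>
        (st.1.insert (vn (PySem.List.pyGetD raw_data pair.2 []))
           (PySem.List.slice raw_data (some st.2) (some (pair.2 + 1))),
         pair.2 + 1))
      (PySem.Dict.empty, 0)
    -- v_segs.update({'light_changes': raw_data[last_end:]})
    (st.1.update [("light_changes", PySem.List.slice raw_data (some st.2) none)]).items

-- ===== PORT B =====
def split_raw_data_alt (raw_data : List (List (String × String))) : List (String × List (List (String × String))) :=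
  let names := raw_data.map vn
  -- for i, (name, nxt) in enumerate(zip(names, names[1:] + [''])):
  let st := (PySem.List.enumerate (names.zip ((PySem.List.slice names (some 1) none) ++ [""])) 0).foldl
    (fun (st : PySem.Dict String (List (List (String × String))) × Int) p =>
      if p.2.1 != "" && p.2.2 == "" then
        (st.1.insert p.2.1 (PySem.List.slice raw_data (some st.2) (some (p.1 + 1))), p.1 + 1)
      else st)
    (PySem.Dict.empty, 0)
  (st.1.insert "light_changes" (PySem.List.slice raw_data (some st.2) none)).items

-- ===== PRECONDITION & SPEC =====
-- Pre_ excludes exactly the inputs where some item lacks the 'videoName' key: there A (and B) raise KeyError.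
def Pre_split_raw_data (raw_data : List (List (String × String))) : Prop :=
  (raw_data.all (fun item => ((PySem.Dict.mk item).get? "videoName").isSome)) = true
instance (raw_data : List (List (String × String))) : Decidable (Pre_split_raw_data raw_data) := by unfold Pre_split_raw_data; infer_instance

def pvWitness_split_raw_data : (List (List (String × String))) :=
  [[("videoName", "v"), ("t", "1")], [("videoName", "v")], [("videoName", ""), ("t", "2")]]

def Spec_split_raw_data (raw_data : List (List (String × String))) (out : List (String × List (List (String × String)))) : Prop := out = split_raw_data_alt raw_data
instance (raw_data : List (List (String × String))) (out : List (String × List (List (String × String)))) : Decidable (Spec_split_raw_data raw_data out) := by unfold Spec_split_raw_data; infer_instance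

-- ===== CLAIM (what is proved, stated in full; the proofs are below) =====
def Claim_equal_split_raw_data : Prop := ∀ (raw_data : List (List (String × String))), Dom_split_raw_data raw_data → Pre_split_raw_data raw_data → Spec_split_raw_data raw_data (split_raw_data raw_data)

-- ===== LEMMAS AND PROOFS =====

-- the common segment-cutting step, over the names list (key = names[i]) and the raw list (slice)
def segStep (raw : List (List (String × String))) (names : List String)
    (st : PySem.Dict String (List (List (String × String))) × Int) (i : Int) :
    PySem.Dict String (List (List (String × String))) × Int :=
  (st.1.insert (PySem.List.pyGetD names i "") (PySem.List.slice raw (some st.2) (some (i + 1))), i + 1)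

-- last index of each maximal run of consecutive integers
def runEnds : List Int → List Int
  | [] => []
  | [x] => [x]
  | x :: y :: xs => if y = x + 1 then runEnds (y :: xs) else x :: runEnds (y :: xs)

-- indices of non-empty names, from offset s (A's video_indices)
def Vl (names : List String) (s : Int) : List Int :=
  ((PySem.List.enumerate names s).filter (fun p => p.2 != "")).map (·.1)

-- indices where a run of non-empty names ends (B's cut points)
def El (names : List String) (s : Int) : List Int :=
  ((PySem.List.enumerate (names.zip (names.tail ++ [""])) s).filter
      (fun p => p.2.1 != "" && p.2.2 == "")).map (·.1)

-- both ports reduce to one fold of segStep over the cut points El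
def common (raw : List (List (String × String))) : List (String × List (List (String × String))) :=
  let st := (El (raw.map vn) 0).foldl (segStep raw (raw.map vn)) (PySem.Dict.empty, 0)
  (st.1.insert "light_changes" (PySem.List.slice raw (some st.2) none)).items

theorem Vl_cons (a : String) (l : List String) (s : Int) :
    Vl (a :: l) s = (if a ≠ "" then [s] else []) ++ Vl l (s + 1) := by
  simp only [Vl, PySem.List.enumerate_cons, List.filter_cons]
  by_cases h : a = "" <;> simp [h]

theorem El_single (a : String) (s : Int) :
    El [a] s = if a ≠ "" then [s] else [] := by
  simp only [El]
  by_cases h : a = "" <;> simp [h, PySem.List.enumerate_cons]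

theorem El_cons₂ (a b : String) (rs : List String) (s : Int) :
    El (a :: b :: rs) s = (if a ≠ "" ∧ b = "" then [s] else []) ++ El (b :: rs) (s + 1) := by
  simp only [El, List.tail_cons]
  by_cases ha : a = "" <;> by_cases hb : b = "" <;> simp [ha, hb]

theorem Vl_lb (names : List String) : ∀ (s x : Int), x ∈ Vl names s → s ≤ x := by
  induction names with
  | nil => intro s x h; simp [Vl] at h
  | cons a l ih =>
    intro s x h
    rw [Vl_cons] at h
    rcases List.mem_append.1 h with h | h
    · by_cases ha : a = "" <;> simp [ha] at h; omega
    · have := ih (s+1) x h; omega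

-- the cut points B detects are exactly the run ends of A's index list
theorem runEnds_Vl (names : List String) : ∀ s : Int, runEnds (Vl names s) = El names s := by
  induction names with
  | nil => intro s; rfl
  | cons a rest ih =>
    intro s
    cases rest with
    | nil =>
      rw [El_single]
      by_cases ha : a = "" <;> simp [ha, Vl, runEnds]
    | cons b rs =>
      rw [El_cons₂, Vl_cons]
      by_cases ha : a = ""
      · simp only [ha, ne_eq, not_true_eq_false, ite_false]
        simp only [List.nil_append]
        rw [ih (s+1)]
        simp

      · by_cases hb : b = ""
        · rw [if_pos ha, if_pos (And.intro ha hb)]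
          have hV : Vl (b :: rs) (s+1) = Vl rs (s+1+1) := by
            rw [Vl_cons]; simp [hb]
          rw [← ih (s+1), List.singleton_append, List.singleton_append]
          rcases h2 : Vl (b :: rs) (s+1) with _ | ⟨v, t⟩
          · simp [runEnds]
          · have hv : s + 1 + 1 ≤ v := by
              apply Vl_lb rs (s+1+1) v
              rw [← hV, h2]; exact List.mem_cons_self
            simp [runEnds, show ¬(v = s + 1) by omega]
        · simp only [if_pos ha]
          have hV : Vl (b :: rs) (s+1) = (s+1) :: Vl rs (s+1+1) := by
            rw [Vl_cons]; simp [hb]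
          have hr : runEnds (s :: Vl (b :: rs) (s+1)) = runEnds (Vl (b :: rs) (s+1)) := by
            rw [hV]; simp [runEnds]
          simp only [List.singleton_append]
          rw [hr, ih (s+1)]
          simp [hb]

theorem gcv_aux : ∀ (rest : List Int) (ranges : List (Int × Int)) (s e : Int),
    (let st := rest.foldl
        (fun (st : List (Int × Int) × Int × Int) nu =>
          if nu = st.2.2 + 1 then (st.1, st.2.1, nu)
          else (st.1 ++ [(st.2.1, st.2.2)], nu, nu))
        (ranges, s, e)
     (st.1 ++ [(st.2.1, st.2.2)]).map (·.2)) = ranges.map (·.2) ++ runEnds (e :: rest) := by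
  intro rest
  induction rest with
  | nil => intro ranges s e; simp [runEnds]
  | cons nu rs ih =>
    intro ranges s e
    by_cases h : nu = e + 1
    · simp only [List.foldl_cons, if_pos h]
      rw [ih ranges s nu]
      simp [runEnds, h]
    · simp only [List.foldl_cons, if_neg h]
      rw [ih (ranges ++ [(s, e)]) nu nu]
      simp [runEnds, h]

theorem gcv_ends (l : List Int) : (get_continuous_values l).map (·.2) = runEnds l := by
  cases l with
  | nil => rfl
  | cons x rest =>
    have := gcv_aux rest [] x x
    simpa [get_continuous_values] using this

theorem enum_getD {α : Type} (d : α) (xs : List α) :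
    ∀ (s : Int) (p : Int × α), p ∈ PySem.List.enumerate xs s →
      s ≤ p.1 ∧ p.2 = PySem.List.pyGetD xs (p.1 - s) d := by
  induction xs with
  | nil => intro s p h; simp [PySem.List.enumerate] at h
  | cons x xs ih =>
    intro s p h
    rw [PySem.List.enumerate_cons] at h
    rcases List.mem_cons.1 h with h | h
    · subst h
      refine ⟨le_refl _, ?_⟩
      rw [PySem.List.pyGetD_of_nonneg _ _ (by omega)]
      simp
    · obtain ⟨h1, h2⟩ := ih (s+1) p h
      refine ⟨by omega, ?_⟩
      rw [h2, PySem.List.pyGetD_of_nonneg _ _ (by omega), PySem.List.pyGetD_of_nonneg _ _ (by omega)]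
      have : (p.1 - s).toNat = (p.1 - (s+1)).toNat + 1 := by omega
      rw [this]
      simp

theorem enumerate_map {α β : Type} (g : α → β) (xs : List α) :
    ∀ s : Int, PySem.List.enumerate (xs.map g) s = (PySem.List.enumerate xs s).map (fun p => (p.1, g p.2)) := by
  induction xs with
  | nil => intro s; rfl
  | cons x xs ih => intro s; simp [PySem.List.enumerate_cons, ih]

theorem key_eq (raw : List (List (String × String))) (i : Int) :
    vn (PySem.List.pyGetD raw i []) = PySem.List.pyGetD (raw.map vn) i "" :=
  (PySem.List.pyGetD_map vn raw i []).symm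

-- A's index-collecting loop is Vl over the names
theorem vi_eq (raw : List (List (String × String))) :
    (PySem.List.enumerate raw 0).foldl (fun acc p => if vn p.2 != "" then acc ++ [p.1] else acc) []
      = Vl (raw.map vn) 0 := by
  rw [PySem.List.foldl_append_if (fun p : Int × List (String × String) => vn p.2 != "")
        (fun p : Int × List (String × String) => p.1)]
  unfold Vl
  rw [enumerate_map, List.filter_map, List.map_map]
  simp [Function.comp_def]

theorem map_fst_zip_names (names : List String) :
    (names.zip (names.tail ++ [""])).map (·.1) = names := by
  apply List.map_fst_zip
  cases names <;> simp

theorem B_eq (raw : List (List (String × String))) :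
    split_raw_data_alt raw = common raw := by
  unfold split_raw_data_alt common
  simp only [PySem.List.slice_from_one]
  have h1 := @List.foldl_filter (Int × (String × String)) _
    (fun p => p.2.1 != "" && p.2.2 == "")
    (fun (st : PySem.Dict String (List (List (String × String))) × Int) p =>
      (st.1.insert p.2.1 (PySem.List.slice raw (some st.2) (some (p.1 + 1))), p.1 + 1))
    (PySem.List.enumerate ((raw.map vn).zip ((raw.map vn).tail ++ [""])) 0)
    (PySem.Dict.empty, 0)
  simp only [] at h1
  rw [← h1]
  have h2 : List.foldl
      (fun (st : PySem.Dict String (List (List (String × String))) × Int) p =>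
        (st.1.insert p.2.1 (PySem.List.slice raw (some st.2) (some (p.1 + 1))), p.1 + 1))
      (PySem.Dict.empty, 0)
      (((PySem.List.enumerate ((raw.map vn).zip ((raw.map vn).tail ++ [""])) 0)).filter
        (fun p => p.2.1 != "" && p.2.2 == ""))
    = List.foldl (fun st p => segStep raw (raw.map vn) st p.1) (PySem.Dict.empty, 0)
      (((PySem.List.enumerate ((raw.map vn).zip ((raw.map vn).tail ++ [""])) 0)).filter
        (fun p => p.2.1 != "" && p.2.2 == "")) := by
    apply PySem.List.foldl_congr_mem
    intro acc p hp
    have hpz := (List.mem_filter.1 hp).1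
    have hkey := (enum_getD ("", "") _ 0 p hpz).2
    have : p.2.1 = PySem.List.pyGetD (raw.map vn) p.1 "" := by
      rw [hkey]
      have := PySem.List.pyGetD_map (fun q : String × String => q.1)
        ((raw.map vn).zip ((raw.map vn).tail ++ [""])) (p.1 - 0) ("", "")
      simp only [sub_zero] at *
      rw [← this]
      congr 1
      · exact map_fst_zip_names (raw.map vn)
    unfold segStep
    rw [this]
  rw [h2]
  have h3 := @List.foldl_map (Int × (String × String)) Int _
    (fun p : Int × (String × String) => p.1) (segStep raw (raw.map vn))
    (((PySem.List.enumerate ((raw.map vn).zip ((raw.map vn).tail ++ [""])) 0)).filter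
      (fun p => p.2.1 != "" && p.2.2 == ""))
    (PySem.Dict.empty, 0)
  simp only [] at h3
  rw [← h3]
  rfl

theorem A_eq (raw : List (List (String × String))) :
    split_raw_data raw = common raw := by
  unfold split_raw_data
  rw [vi_eq]
  by_cases h : Vl (raw.map vn) 0 = []
  · rw [if_pos h]
    unfold common
    rw [← runEnds_Vl, h]
    simp [runEnds, pysem, PySem.Dict.empty]
  · rw [if_neg h]
    simp only [key_eq]
    have hbody : (fun (st : PySem.Dict String (List (List (String × String))) × Int) (pair : Int × Int) =>
        (st.1.insert (PySem.List.pyGetD (raw.map vn) pair.2 "")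
          (PySem.List.slice raw (some st.2) (some (pair.2 + 1))), pair.2 + 1))
      = (fun st pair => segStep raw (raw.map vn) st pair.2) := rfl
    rw [hbody]
    have h2 := @List.foldl_map (Int × Int) Int _
      (fun pair : Int × Int => pair.2) (segStep raw (raw.map vn))
      (get_continuous_values (Vl (raw.map vn) 0)) (PySem.Dict.empty, 0)
    simp only [] at h2
    rw [← h2, show (List.map (fun pair : Int × Int => pair.2) (get_continuous_values (Vl (raw.map vn) 0)))
        = runEnds (Vl (raw.map vn) 0) from gcv_ends _, runEnds_Vl]
    rfl

theorem ports_eq (raw : List (List (String × String))) :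
    split_raw_data raw = split_raw_data_alt raw := by
  rw [A_eq, B_eq]

-- ===== VERDICT (by name: the statement is the Claim_ definition above) =====
theorem split_raw_data_spec : Claim_equal_split_raw_data := by
  intro raw _ _
  unfold Spec_split_raw_data
  exact ports_eq raw
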